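-- pv_equiv track=rewrite | github.com/paveleroshkinweb/algorithms | algorithms/src/problems/misha_math.py | find_operations
-- ===== SOURCE A (Python) =====
-- def find_operations(numbers):
--     current_parity = numbers[0] & 1
--     signs = []
--     for i in range(1, len(numbers)):
--         next_n = numbers[i]
--         next_parity = next_n & 1
--
--         if current_parity == 0 and next_parity == 0:
--             signs.append('+')
--             continue
--
--         elif current_parity == 0 and next_parity == 1:
--             signs.append('+')
--         elif current_parity == 1 and next_parity == 0:
--             signs.append('+')
--         else:
--             signs.append('x')
--
--         current_parity = 1
--     return ''.join(signs)
-- ===== SOURCE B (Python) =====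
-- def find_operations(numbers):
--     parities = [x & 1 for x in numbers]
--     if 1 not in parities:
--         return '+' * (len(numbers) - 1)
--     f = parities.index(1)
--     return ''.join('x' if i > f and p == 1 else '+'
--                    for i, p in enumerate(parities[1:], start=1))
-- ===== Notes on version B (the rewrite author's own statement) =====
-- stated objective: simpler
-- what changed: Replaces A's stateful four-branch parity loop with a first-odd-index pre-scan over a parity list followed by a stateless mapping pass ('x' iff the position is after the first odd and itself odd).
import Mathlib
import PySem

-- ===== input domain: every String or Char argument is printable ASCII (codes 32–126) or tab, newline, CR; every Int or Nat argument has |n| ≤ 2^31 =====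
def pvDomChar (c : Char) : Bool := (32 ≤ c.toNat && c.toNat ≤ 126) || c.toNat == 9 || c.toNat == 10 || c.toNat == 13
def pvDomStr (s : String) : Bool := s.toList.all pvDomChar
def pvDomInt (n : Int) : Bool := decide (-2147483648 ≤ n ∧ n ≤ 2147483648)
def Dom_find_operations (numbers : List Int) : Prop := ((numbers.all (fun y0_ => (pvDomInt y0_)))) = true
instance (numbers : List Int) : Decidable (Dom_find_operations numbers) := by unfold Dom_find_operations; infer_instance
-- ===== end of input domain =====

-- B replaces A's stateful four-branch parity loop by a first-odd-index pre-scan plus a stateless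
-- mapping pass (objective: simpler).  On [] A raises IndexError (excluded by Pre_); B returns "".

-- ===== PORT A =====
def find_operations (numbers : List Int) : String :=
  match numbers with
  | [] => ""   -- unreachable under Pre_: Python raises IndexError on numbers[0]
  | h :: t =>
    let r := t.foldl (fun (st : Int × List Char) next_n =>
        let next_parity := PySem.Int.band next_n 1
        if st.1 = 0 ∧ next_parity = 0 then (st.1, st.2 ++ ['+'])
        else if st.1 = 0 ∧ next_parity = 1 then ((1 : Int), st.2 ++ ['+'])
        else if st.1 = 1 ∧ next_parity = 0 then ((1 : Int), st.2 ++ ['+'])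
        else ((1 : Int), st.2 ++ ['x']))
      (PySem.Int.band h 1, [])
    String.ofList r.2

-- ===== PORT B =====
def find_operations_alt (numbers : List Int) : String :=
  let parities := numbers.map (fun x => PySem.Int.band x 1)
  if (1 : Int) ∉ parities then
    String.ofList (List.replicate (numbers.length - 1) '+')
  else
    let f : Nat := (PySem.List.index? parities 1).getD 0
    String.ofList ((PySem.List.enumerate (PySem.List.slice parities (some 1) none) 1).map
      (fun ip => if (f : Int) < ip.1 ∧ ip.2 = 1 then 'x' else '+'))

-- ===== PRECONDITION & SPEC =====
-- Pre_ excludes only the empty list, on which Python A raises IndexError (numbers[0]).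
def Pre_find_operations (numbers : List Int) : Prop := numbers ≠ []
instance (numbers : List Int) : Decidable (Pre_find_operations numbers) := by unfold Pre_find_operations; infer_instance
def pvWitness_find_operations : List Int := ([1, 2, 3, 4])

def Spec_find_operations (numbers : List Int) (out : String) : Prop := out = find_operations_alt numbers
instance (numbers : List Int) (out : String) : Decidable (Spec_find_operations numbers out) := by unfold Spec_find_operations; infer_instance

-- ===== CLAIM (what is proved, stated in full; the proofs are below) =====
def Claim_equal_find_operations : Prop := ∀ (numbers : List Int), Dom_find_operations numbers → Pre_find_operations numbers → Spec_find_operations numbers (find_operations numbers)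

-- ===== LEMMAS AND PROOFS =====

-- proof-side: the sign list A's loop produces, over the PARITY list, mirroring A's branches
def sP (cp : Int) : List Int → List Char
  | [] => []
  | p :: l =>
    if cp = 0 ∧ p = 0 then '+' :: sP cp l
    else if cp = 0 ∧ p = 1 then '+' :: sP 1 l
    else if cp = 1 ∧ p = 0 then '+' :: sP 1 l
    else 'x' :: sP 1 l

theorem band1_cases (x : Int) : PySem.Int.band x 1 = 0 ∨ PySem.Int.band x 1 = 1 := by
  rw [PySem.Int.band_one]
  have h1 := PySem.Int.mod_nonneg x (b := 2) (by norm_num)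
  have h2 := PySem.Int.mod_lt x (b := 2) (by norm_num)
  omega

theorem foldA_eq_sP (l : List Int) : ∀ (cp : Int) (acc : List Char),
    (l.foldl (fun (st : Int × List Char) next_n =>
        let next_parity := PySem.Int.band next_n 1
        if st.1 = 0 ∧ next_parity = 0 then (st.1, st.2 ++ ['+'])
        else if st.1 = 0 ∧ next_parity = 1 then ((1 : Int), st.2 ++ ['+'])
        else if st.1 = 1 ∧ next_parity = 0 then ((1 : Int), st.2 ++ ['+'])
        else ((1 : Int), st.2 ++ ['x'])) (cp, acc)).2
      = acc ++ sP cp (l.map (fun x => PySem.Int.band x 1)) := by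
  induction l with
  | nil => intro cp acc; simp [sP]
  | cons n l ih =>
    intro cp acc
    simp only [List.foldl_cons, List.map_cons, sP]
    by_cases h1 : cp = 0 ∧ PySem.Int.band n 1 = 0
    · simp only [if_pos h1, ih, List.append_assoc, List.singleton_append]
    · by_cases h2 : cp = 0 ∧ PySem.Int.band n 1 = 1
      · simp only [if_neg h1, if_pos h2, ih, List.append_assoc, List.singleton_append]
      · by_cases h3 : cp = 1 ∧ PySem.Int.band n 1 = 0
        · simp only [if_neg h1, if_neg h2, if_pos h3, ih, List.append_assoc, List.singleton_append]
        · simp only [if_neg h1, if_neg h2, if_neg h3, ih, List.append_assoc, List.singleton_append]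

theorem sP_zero_no_one (q : List Int) (hq : ∀ p ∈ q, p = 0 ∨ p = 1) (h1 : (1:Int) ∉ q) :
    sP 0 q = List.replicate q.length '+' := by
  induction q with
  | nil => simp [sP]
  | cons p q ih =>
    have hp : p = 0 := by
      rcases hq p (by simp) with h | h
      · exact h
      · exact absurd (h ▸ List.mem_cons_self) h1
    subst hp
    have hc : (0:Int) = 0 ∧ (0:Int) = 0 := ⟨rfl, rfl⟩
    simp only [sP, List.length_cons, List.replicate_succ]
    exact congrArg _ (ih (fun p hp => hq p (by simp [hp])) (fun h => h1 (by simp [h])))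

theorem sP_one (q : List Int) (hq : ∀ p ∈ q, p = 0 ∨ p = 1) :
    sP 1 q = q.map (fun p => if p = 1 then 'x' else '+') := by
  induction q with
  | nil => simp [sP]
  | cons p q ih =>
    have ih' := ih (fun p hp => hq p (by simp [hp]))
    rcases hq p (by simp) with h | h <;> subst h <;> simp [sP, ih']

theorem enum_map_triv (q : List Int) : ∀ (s t : Int), t < s →
    (PySem.List.enumerate q s).map (fun ip => if t < ip.1 ∧ ip.2 = 1 then 'x' else '+')
      = q.map (fun p => if p = 1 then 'x' else '+') := by
  induction q with
  | nil => intro s t _; simp [PySem.List.enumerate_nil]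
  | cons p q ih =>
    intro s t hts
    rw [PySem.List.enumerate_cons, List.map_cons, List.map_cons, ih (s+1) t (by omega)]
    have h : (t < s ∧ p = 1) ↔ (p = 1) := by
      constructor
      · exact fun h => h.2
      · exact fun h => ⟨hts, h⟩
    simp only [h]

theorem sP_zero_first_one (q : List Int) : ∀ (s : Int) (j : Nat),
    (∀ p ∈ q, p = 0 ∨ p = 1) → PySem.List.index? q 1 = some j →
    sP 0 q = (PySem.List.enumerate q s).map
      (fun ip => if s + (j : Int) < ip.1 ∧ ip.2 = 1 then 'x' else '+') := by
  induction q with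
  | nil => intro s j _ hidx; rw [PySem.List.index?_eq_idxOf?] at hidx; simp at hidx
  | cons p q ih =>
    intro s j hq hidx
    rcases hq p (by simp) with hp | hp
    · subst hp
      rw [PySem.List.index?_cons_of_ne q (by norm_num)] at hidx
      rcases Option.map_eq_some_iff.mp hidx with ⟨j', hj', rfl⟩
      rw [PySem.List.enumerate_cons, List.map_cons]
      have hcase : ¬ (s + ((j' + 1 : Nat) : Int) < s ∧ (0:Int) = 1) := by push_cast; omega
      rw [if_neg hcase]
      show ('+' :: sP 0 q : List Char) = _
      · refine congrArg _ ((ih (s+1) j' (fun p hp => hq p (by simp [hp])) hj').trans ?_)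
        apply List.map_congr_left
        intro ip _
        have h : (s + 1 + (j' : Int) < ip.1) ↔ (s + ((j' + 1 : Nat) : Int) < ip.1) := by
          push_cast; omega
        simp only [h]
    · subst hp
      rw [PySem.List.index?_cons_self] at hidx
      injection hidx with hj; subst hj
      rw [PySem.List.enumerate_cons, List.map_cons]
      have hcase : ¬ (s + ((0 : Nat) : Int) < s ∧ (1:Int) = 1) := by push_cast; omega
      rw [if_neg hcase]
      show ('+' :: sP 1 q : List Char) = _
      · refine congrArg _ ?_
        rw [sP_one q (fun p hp => hq p (by simp [hp]))]
        exact (enum_map_triv q (s+1) (s + ((0:Nat):Int)) (by push_cast; omega)).symm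

-- ===== VERDICT =====
theorem find_operations_spec : Claim_equal_find_operations := by
  intro numbers _ hpre
  unfold Spec_find_operations
  match numbers with
  | [] => exact absurd rfl hpre
  | h :: t =>
    have hq : ∀ p ∈ t.map (fun x => PySem.Int.band x 1), p = 0 ∨ p = 1 := by
      intro p hp
      rcases List.mem_map.mp hp with ⟨x, _, rfl⟩
      exact band1_cases x
    simp only [find_operations, find_operations_alt, List.map_cons]
    rw [foldA_eq_sP, List.nil_append]
    by_cases hmem : (1:Int) ∉ PySem.Int.band h 1 :: t.map (fun x => PySem.Int.band x 1)
    · rw [if_pos hmem]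
      have hh : PySem.Int.band h 1 = 0 := by
        rcases band1_cases h with h0 | h0
        · exact h0
        · exact absurd (show (1:Int) ∈ _ by rw [h0]; exact List.mem_cons_self) hmem
      rw [hh]
      refine congrArg String.ofList ?_
      rw [sP_zero_no_one _ hq (fun hmem' => hmem (List.mem_cons_of_mem _ hmem'))]
      simp
    · rw [if_neg hmem]
      rw [PySem.List.slice_from_one, List.tail_cons]
      have hmem0 : (1:Int) ∈ PySem.Int.band h 1 :: t.map (fun x => PySem.Int.band x 1) :=
        not_not.mp hmem
      rcases band1_cases h with hh | hh
      · -- head even: first 1 is in the tail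
        have hmem' : (1:Int) ∈ t.map (fun x => PySem.Int.band x 1) := by
          rcases List.mem_cons.mp hmem0 with h' | h'
          · rw [hh] at h'; norm_num at h'
          · exact h'
        rcases hj : PySem.List.index? (t.map (fun x => PySem.Int.band x 1)) 1 with _ | j
        · exact absurd hmem' ((PySem.List.index?_eq_none_iff _ _).mp hj)
        simp only [hh]
        simp only [PySem.List.index?_cons_of_ne _ (show (0:Int) ≠ 1 by norm_num)]
        simp only [hj]
        simp only [Option.map_some, Option.getD_some]
        refine congrArg String.ofList ?_
        rw [sP_zero_first_one _ 1 j hq hj]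
        apply List.map_congr_left
        intro ip _
        have h : ((1:Int) + (j:Int) < ip.1) ↔ ((((j+1 : Nat)):Int) < ip.1) := by push_cast; omega
        simp only [h]
        rfl
      · -- head odd: f = 0
        simp only [hh, PySem.List.index?_cons_self, Option.getD_some]
        refine congrArg String.ofList ?_
        rw [sP_one _ hq]
        exact (enum_map_triv _ 1 (((0:Nat)):Int) (by norm_num)).symm
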